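-- pv_equiv track=rewrite | github.com/DermaVLM/DermaSynth-VQA | src/knowledge_base/wikipedia_api_scraper.py | clean_content
-- ===== SOURCE A (Python) =====
-- from typing import Dict, List, Optional
--
-- def clean_content(content: str) -> Dict[str, str]:
--     """Organize content into sections"""
--     sections = {"overview": ""}
--     current_section = "overview"
--
--     for line in content.split("\n"):
--         if line.startswith("==") and line.endswith("=="):
--             # New section
--             section_name = line.strip("= ").lower()
--             if section_name not in ["references", "external links", "see also"]:
--                 current_section = section_name
--                 sections[current_section] = ""
--         else:
--             sections[current_section] += line + "\n"
--
--     # Clean up sections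
--     return {k: v.strip() for k, v in sections.items() if v.strip()}
-- ===== SOURCE B (Python) =====
-- def clean_content(content: str) -> dict:
--     """Organize content into sections (recursive divide-at-first-header)."""
--     EXCLUDED = ("references", "external links", "see also")
--
--     def is_header(line):
--         return line.startswith("==") and line.endswith("==")
--
--     def is_cut(line):
--         return is_header(line) and line.strip("= ").lower() not in EXCLUDED
--
--     def segments(name, lines):
--         """Section starting here, then recurse on the tail after the next cut."""
--         idx = next((i for i, l in enumerate(lines) if is_cut(l)), None)
--         here = lines if idx is None else lines[:idx]
--         yield name, "\n".join(l for l in here if not is_header(l))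
--         if idx is not None:
--             yield from segments(lines[idx].strip("= ").lower(), lines[idx + 1:])
--
--     sections = {}
--     for name, text in segments("overview", content.split("\n")):
--         sections[name] = text
--     return {k: t for k, t in ((k, t.strip()) for k, t in sections.items()) if t}
-- ===== Notes on version B (the rewrite author's own statement) =====
-- stated objective: alternative
-- what changed: Replaces A's single mutating pass with a cursor and dict by a recursive divide-and-name: a generator splits the line list at the first non-excluded header, emits one fully-joined (name, text) segment, and recurses on the tail; a last-wins dict reduce and a strip/filter comprehension finish the job.
import Mathlib
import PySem

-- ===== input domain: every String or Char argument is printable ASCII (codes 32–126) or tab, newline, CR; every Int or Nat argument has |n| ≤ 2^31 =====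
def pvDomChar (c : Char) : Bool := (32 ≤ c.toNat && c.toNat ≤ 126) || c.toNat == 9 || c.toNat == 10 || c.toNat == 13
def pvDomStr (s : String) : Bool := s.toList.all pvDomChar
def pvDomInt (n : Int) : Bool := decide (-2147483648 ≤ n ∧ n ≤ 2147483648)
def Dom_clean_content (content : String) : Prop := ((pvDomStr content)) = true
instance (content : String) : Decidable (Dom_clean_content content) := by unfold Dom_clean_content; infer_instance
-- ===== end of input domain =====

-- B replaces A's single mutating cursor pass by a recursive divide-and-name (split the
-- line list at the first non-excluded header, emit a joined segment, recurse on the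
-- tail), then a last-wins dict reduce and a strip/filter pass; equal return value.

-- helpers shared by both ports (the same Python subexpressions appear in A and B)
def pvExcluded : List String := ["references", "external links", "see also"]

def pvIsHeader (line : String) : Bool :=
  PySem.Str.startswith line "==" && PySem.Str.endswith line "=="

def pvHeaderName (line : String) : String :=
  PySem.Str.lower (PySem.Str.stripChars line "= ")

-- ===== PORT A =====
def clean_content (content : String) : List (String × String) :=
  -- sections = {"overview": ""}; current_section = "overview"; for line in content.split("\n"): …
  let lines := (PySem.Str.split? content "\n").getD []   -- sep = "\n" ≠ "", so split? is never none
  let st := lines.foldl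
    (fun (p : PySem.Dict String String × String) line =>
      if pvIsHeader line then
        let name := pvHeaderName line
        if name ∈ pvExcluded then p
        else (p.1.insert name "", name)
      else (p.1.modify p.2 "" (fun v => v ++ line ++ "\n"), p.2))
    ((PySem.Dict.empty).insert "overview" "", "overview")
  -- return {k: v.strip() for k, v in sections.items() if v.strip()}
  (st.1.items.foldl
    (fun (r : PySem.Dict String String) kv =>
      if PySem.Str.strip kv.2 ≠ "" then r.insert kv.1 (PySem.Str.strip kv.2) else r)
    PySem.Dict.empty).items

-- ===== PORT B =====
-- is_cut(line): is_header(line) and line.strip("= ").lower() not in EXCLUDED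
def pvIsCut (line : String) : Bool :=
  pvIsHeader line && !(decide (pvHeaderName line ∈ pvExcluded))

-- def segments(name, lines): idx = next((i for i,l in enumerate(lines) if is_cut(l)), None);
--   here = lines if idx is None else lines[:idx];
--   yield name, "\n".join(l for l in here if not is_header(l));
--   if idx is not None: yield from segments(lines[idx].strip("= ").lower(), lines[idx+1:])
-- lines[idx] is read with getD; idx comes from findIdx? so it is always in range (exact).
def pvSegments (name : String) (lines : List String) : List (String × String) :=
  match h : lines.findIdx? pvIsCut with
  | none => [(name, PySem.Str.join "\n" (lines.filter (fun l => !pvIsHeader l)))]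
  | some i =>
      (name, PySem.Str.join "\n" ((lines.take i).filter (fun l => !pvIsHeader l))) ::
      pvSegments (pvHeaderName (lines.getD i "")) (lines.drop (i + 1))
termination_by lines.length
decreasing_by
  have hi := (List.findIdx?_eq_some_iff_findIdx_eq.mp h).1
  simp only [List.length_drop]
  omega

def clean_content_alt (content : String) : List (String × String) :=
  let lines := (PySem.Str.split? content "\n").getD []
  -- sections = {}; for name, text in segments("overview", lines): sections[name] = text
  let secs := (pvSegments "overview" lines).foldl
    (fun (d : PySem.Dict String String) s => d.insert s.1 s.2) PySem.Dict.empty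
  -- return {k: t for k, t in ((k, t.strip()) for k, t in sections.items()) if t}
  (secs.items.foldl
    (fun (r : PySem.Dict String String) kv =>
      let t := PySem.Str.strip kv.2
      if t ≠ "" then r.insert kv.1 t else r)
    PySem.Dict.empty).items

-- ===== PRECONDITION & SPEC =====
def Spec_clean_content (content : String) (out : List (String × String)) : Prop := out = clean_content_alt content
instance (content : String) (out : List (String × String)) : Decidable (Spec_clean_content content out) := by unfold Spec_clean_content; infer_instance

-- ===== CLAIM =====
def Claim_equal_clean_content : Prop := ∀ (content : String), Dom_clean_content content → Spec_clean_content content (clean_content content)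

-- ===== LEMMAS AND PROOFS =====

-- proof-only bridge: the section list as (name, body-lines) segments.
-- oldFold-style accumulation used as the common intermediate between A and B.
def pvAppendLast : List (String × List String) → String → List (String × List String)
  | [], _ => []
  | [s], line => [(s.1, s.2 ++ [line])]
  | s :: t :: rest, line => s :: pvAppendLast (t :: rest) line

-- the cursor-style fold over lines producing the segment list (A's traversal order)
def pvSegFold (lines : List String) (init : List (String × List String)) :
    List (String × List String) :=
  lines.foldl
    (fun (segs : List (String × List String)) line =>
      if pvIsHeader line then
        let name := pvHeaderName line
        if name ∈ pvExcluded then segs else segs ++ [(name, ([] : List String))]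
      else pvAppendLast segs line)
    init

-- B's divide-at-first-cut decomposition, restated as a structural recursion over the
-- lines with a pending body prefix b (proof-only; bridged to pvSegments below)
def pvSegLFrom (name : String) (b : List String) : List String → List (String × List String)
  | [] => [(name, b)]
  | l :: rest =>
    if pvIsCut l then (name, b) :: pvSegLFrom (pvHeaderName l) [] rest
    else if pvIsHeader l then pvSegLFrom name b rest
    else pvSegLFrom name (b ++ [l]) rest

-- dict built from segments, value computed from the body by f
def pvSegsDict (f : List String → String) (segs : List (String × List String)) :
    PySem.Dict String String :=
  segs.foldl (fun d s => d.insert s.1 (f s.2)) PySem.Dict.empty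

-- dict of bodies themselves (last segment with a name wins, first position kept)
def pvLast (segs : List (String × List String)) : PySem.Dict String (List String) :=
  segs.foldl (fun d s => d.insert s.1 s.2) PySem.Dict.empty

-- A's accumulated section text for one body
def pvBodyA (body : List String) : String :=
  body.foldl (fun v l => v ++ l ++ "\n") ""

theorem pvSegsDict_concat (f : List String → String) (segs : List (String × List String))
    (s : String × List String) :
    pvSegsDict f (segs ++ [s]) = (pvSegsDict f segs).insert s.1 (f s.2) := by
  simp [pvSegsDict]

theorem pvLast_concat (segs : List (String × List String)) (s : String × List String) :
    pvLast (segs ++ [s]) = (pvLast segs).insert s.1 s.2 := by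
  simp [pvLast]

theorem pvBodyA_concat (b : List String) (l : String) :
    pvBodyA (b ++ [l]) = pvBodyA b ++ l ++ "\n" := by
  simp [pvBodyA]

theorem pvAppendLast_concat (init : List (String × List String)) (n : String)
    (b : List String) (l : String) :
    pvAppendLast (init ++ [(n, b)]) l = init ++ [(n, b ++ [l])] := by
  induction init with
  | nil => rfl
  | cons a init ih =>
    cases init with
    | nil => simp [pvAppendLast]
    | cons a' init' => simpa [pvAppendLast] using ih

-- the main loop invariant: A's (dict, cursor) state is determined by the segment fold
theorem pv_loop (lines : List String) :
    ∀ (init : List (String × List String)) (n : String) (b : List String),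
    ∃ init' n' b',
      pvSegFold lines (init ++ [(n, b)]) = init' ++ [(n', b')] ∧
      lines.foldl
        (fun (p : PySem.Dict String String × String) line =>
          if pvIsHeader line then
            let name := pvHeaderName line
            if name ∈ pvExcluded then p
            else (p.1.insert name "", name)
          else (p.1.modify p.2 "" (fun v => v ++ line ++ "\n"), p.2))
        (pvSegsDict pvBodyA (init ++ [(n, b)]), n)
        = (pvSegsDict pvBodyA (init' ++ [(n', b')]), n') := by
  induction lines with
  | nil => exact fun init n b => ⟨init, n, b, rfl, rfl⟩
  | cons line rest ih =>
    intro init n b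
    simp only [pvSegFold, List.foldl_cons] at *
    by_cases h : pvIsHeader line = true
    · by_cases hex : pvHeaderName line ∈ pvExcluded
      · simp only [h, hex, if_pos]
        exact ih init n b
      · simp only [h, if_true, hex, if_neg, not_false_iff]
        obtain ⟨i', n', b', h1, h2⟩ := ih (init ++ [(n, b)]) (pvHeaderName line) []
        refine ⟨i', n', b', by simpa using h1, ?_⟩
        have e : pvSegsDict pvBodyA ((init ++ [(n, b)]) ++ [(pvHeaderName line, ([] : List String))])
            = (pvSegsDict pvBodyA (init ++ [(n, b)])).insert (pvHeaderName line) "" := by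
          rw [pvSegsDict_concat]; rfl
        rw [← e]
        simpa using h2
    · simp only [h]
      rw [pvAppendLast_concat]
      obtain ⟨i', n', b', h1, h2⟩ := ih init n (b ++ [line])
      refine ⟨i', n', b', h1, ?_⟩
      have e : (pvSegsDict pvBodyA (init ++ [(n, b)])).modify n ""
            (fun v => v ++ line ++ "\n")
          = pvSegsDict pvBodyA (init ++ [(n, b ++ [line])]) := by
        rw [pvSegsDict_concat, pvSegsDict_concat, pvBodyA_concat]
        simp [PySem.Dict.modify, PySem.Dict.getD_insert_self,
          PySem.Dict.insert_insert_self]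
      rw [e]
      exact h2

-- the segment fold equals B's divide-at-first-cut decomposition
theorem pv_segfold_eq (lines : List String) :
    ∀ (init : List (String × List String)) (n : String) (b : List String),
      pvSegFold lines (init ++ [(n, b)]) = init ++ pvSegLFrom n b lines := by
  induction lines with
  | nil => intro init n b; simp [pvSegFold, pvSegLFrom]
  | cons line rest ih =>
    intro init n b
    simp only [pvSegFold, List.foldl_cons] at *
    by_cases hh : pvIsHeader line = true
    · by_cases hex : pvHeaderName line ∈ pvExcluded
      · have hc : pvIsCut line = false := by simp [pvIsCut, hh, hex]
        simp only [hh, if_pos, hex, pvSegLFrom, hc, Bool.false_eq_true, if_false]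
        exact ih init n b
      · have hc : pvIsCut line = true := by simp [pvIsCut, hh, hex]
        simp only [hh, if_true, hex, if_neg, not_false_iff, pvSegLFrom, hc]
        rw [show init ++ [(n, b)] ++ [(pvHeaderName line, ([] : List String))]
            = (init ++ [(n, b)]) ++ [(pvHeaderName line, ([] : List String))] by simp]
        rw [ih (init ++ [(n, b)]) (pvHeaderName line) []]
        simp
    · have hc : pvIsCut line = false := by simp [pvIsCut, hh]
      simp only [hh, Bool.false_eq_true, if_false, pvSegLFrom, hc]
      rw [pvAppendLast_concat]
      exact ih init n (b ++ [line])

-- pvSegLFrom over a cut-free prefix: it only filters headers into the pending body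
theorem pvSegLFrom_nocut_nil (pre : List String) (h : ∀ l ∈ pre, pvIsCut l = false) :
    ∀ (name : String) (b : List String),
      pvSegLFrom name b pre = [(name, b ++ pre.filter (fun l => !pvIsHeader l))] := by
  induction pre with
  | nil => intro name b; simp [pvSegLFrom]
  | cons l pre ih =>
    intro name b
    have hc : pvIsCut l = false := h l (by simp)
    have ih' := ih (fun x hx => h x (by simp [hx]))
    by_cases hh : pvIsHeader l = true
    · simp [pvSegLFrom, hc, hh, ih']
    · simp only [pvSegLFrom, hc, Bool.false_eq_true, if_false, hh, ih', List.filter_cons]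
      simp

theorem pvSegLFrom_nocut_cons (pre : List String) (c : String) (rest : List String)
    (h : ∀ l ∈ pre, pvIsCut l = false) (hc : pvIsCut c = true) :
    ∀ (name : String) (b : List String),
      pvSegLFrom name b (pre ++ c :: rest)
        = (name, b ++ pre.filter (fun l => !pvIsHeader l)) ::
          pvSegLFrom (pvHeaderName c) [] rest := by
  induction pre with
  | nil => intro name b; simp [pvSegLFrom, hc]
  | cons l pre ih =>
    intro name b
    have hl : pvIsCut l = false := h l (by simp)
    have ih' := ih (fun x hx => h x (by simp [hx]))
    by_cases hh : pvIsHeader l = true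
    · simp [pvSegLFrom, hl, hh, ih']
    · simp only [List.cons_append, pvSegLFrom, hl, Bool.false_eq_true, if_false, hh, ih',
        List.filter_cons]
      simp

-- B's generator is the joined image of the segment decomposition
theorem pv_segments_map (lines : List String) : ∀ (name : String),
    pvSegments name lines
      = (pvSegLFrom name [] lines).map (fun p => (p.1, PySem.Str.join "\n" p.2)) := by
  induction hn : lines.length using Nat.strong_induction_on generalizing lines with
  | _ k ih =>
    intro name
    rw [pvSegments]
    split
    · rename_i h
      rw [pvSegLFrom_nocut_nil lines (List.findIdx?_eq_none_iff.mp h)]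
      simp
    · rename_i i h
      obtain ⟨hi, hci, hmin⟩ := List.findIdx?_eq_some_iff_getElem.mp h
      have hpre : ∀ l ∈ lines.take i, pvIsCut l = false := by
        intro l hl
        obtain ⟨j, hj, rfl⟩ := List.mem_iff_getElem.mp hl
        rw [List.getElem_take]
        have hji : j < i := by
          have := hj; simp [List.length_take] at this; omega
        simpa using hmin j hji
      have hdec : lines = lines.take i ++ lines[i] :: lines.drop (i + 1) := by
        rw [List.getElem_cons_drop, List.take_append_drop]
      conv_rhs => rw [hdec]
      rw [pvSegLFrom_nocut_cons (lines.take i) lines[i] (lines.drop (i + 1)) hpre hci]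
      rw [List.getD_eq_getElem lines "" hi]
      simp only [List.map_cons, List.nil_append]
      refine congrArg₂ _ rfl ?_
      exact ih (lines.drop (i + 1)).length (by simp; omega) _ rfl _

-- strip is unaffected by one trailing newline
theorem pv_rstrip_newline (cs : List Char) :
    PySem.Chars.rstrip (cs ++ ['\n']) = PySem.Chars.rstrip cs := by
  simp [PySem.Chars.rstrip, show PySem.Chars.isspace '\n' = true from rfl]

theorem pv_strip_newline (cs : List Char) :
    PySem.Chars.strip (cs ++ ['\n']) = PySem.Chars.strip cs := by
  unfold PySem.Chars.strip PySem.Chars.lstrip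
  rw [List.dropWhile_append]
  by_cases he : (List.dropWhile PySem.Chars.isspace cs).isEmpty = true
  · rw [if_pos he]
    rw [List.isEmpty_iff] at he
    rw [he]
    rfl
  · rw [if_neg he, pv_rstrip_newline]

-- A's "".join-style accumulation, as a flat character list
theorem pvBodyA_toList_aux (body : List String) (acc : String) :
    (body.foldl (fun v l => v ++ l ++ "\n") acc).toList =
      acc.toList ++ (body.map (fun s => s.toList ++ ['\n'])).flatten := by
  induction body generalizing acc with
  | nil => simp
  | cons s rest ih =>
    have hn : ("\n" : String).toList = ['\n'] := by decide
    simp only [List.foldl_cons, List.map_cons, List.flatten_cons, ih,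
      String.toList_append, hn]
    simp

theorem pvBodyA_toList (body : List String) :
    (pvBodyA body).toList = (body.map (fun s => s.toList ++ ['\n'])).flatten := by
  simpa using pvBodyA_toList_aux body ""

-- the flattened "line + newline" text is the join plus one trailing newline
theorem pv_flatten_join (s : String) (rest : List String) :
    ((s :: rest).map (fun t => t.toList ++ ['\n'])).flatten =
      PySem.Chars.join ['\n'] ((s :: rest).map String.toList) ++ ['\n'] := by
  induction rest generalizing s with
  | nil => simp [PySem.Chars.join_singleton]
  | cons t rest ih =>
    simp only [List.map_cons, List.flatten_cons] at ih ⊢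
    rw [ih t, PySem.Chars.join_cons_cons]
    simp

-- the two per-section texts agree after strip
theorem pv_strip_eq (body : List String) :
    PySem.Str.strip (pvBodyA body) = PySem.Str.strip (PySem.Str.join "\n" body) := by
  apply String.toList_inj.mp
  rw [PySem.Str.toList_strip, PySem.Str.toList_strip, PySem.Str.toList_join]
  cases body with
  | nil => simp [pvBodyA_toList, PySem.Chars.join_nil]
  | cons s rest =>
    rw [pvBodyA_toList, pv_flatten_join, pv_strip_newline]
    rfl

-- items of pvSegsDict f are the items of pvLast, with f applied to each value slot
theorem pvSegsDict_items (f : List String → String) (segs : List (String × List String)) :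
    (pvSegsDict f segs).items = (pvLast segs).items.map (fun p => (p.1, f p.2)) := by
  induction segs using List.reverseRecOn with
  | nil => rfl
  | append_singleton segs s ih =>
    rw [pvSegsDict_concat, pvLast_concat, PySem.Dict.items_insert, PySem.Dict.items_insert]
    have hcont : (pvSegsDict f segs).contains s.1 = (pvLast segs).contains s.1 := by
      simp only [PySem.Dict.contains, ih, List.any_map, Function.comp_def]
    rw [hcont]
    by_cases hc : (pvLast segs).contains s.1 = true
    · rw [if_pos hc, if_pos hc, ih, List.map_map, List.map_map]
      apply List.map_congr_left
      intro p _
      by_cases hp : p.1 = s.1 <;> simp [hp]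
    · rw [if_neg hc, if_neg hc, ih]
      simp

-- the closing filter/strip pass gives the same result on both dicts
theorem pv_final (segs : List (String × List String)) :
    ((pvSegsDict pvBodyA segs).items.foldl
      (fun (r : PySem.Dict String String) kv =>
        if PySem.Str.strip kv.2 ≠ "" then r.insert kv.1 (PySem.Str.strip kv.2) else r)
      PySem.Dict.empty).items =
    ((pvSegsDict (fun b => PySem.Str.join "\n" b) segs).items.foldl
      (fun (r : PySem.Dict String String) kv =>
        let t := PySem.Str.strip kv.2
        if t ≠ "" then r.insert kv.1 t else r)
      PySem.Dict.empty).items := by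
  rw [pvSegsDict_items, pvSegsDict_items, List.foldl_map, List.foldl_map]
  simp only [pv_strip_eq]

-- the whole pipeline, on an arbitrary line list (zeta-reduced bodies of both ports)
theorem pv_main (lines : List String) :
    ((lines.foldl
        (fun (p : PySem.Dict String String × String) line =>
          if pvIsHeader line then
            let name := pvHeaderName line
            if name ∈ pvExcluded then p
            else (p.1.insert name "", name)
          else (p.1.modify p.2 "" (fun v => v ++ line ++ "\n"), p.2))
        (pvSegsDict pvBodyA [("overview", ([] : List String))], "overview")).1.items.foldl
      (fun (r : PySem.Dict String String) kv =>
        if PySem.Str.strip kv.2 ≠ "" then r.insert kv.1 (PySem.Str.strip kv.2) else r)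
      PySem.Dict.empty).items =
    (((pvSegments "overview" lines).foldl
        (fun (d : PySem.Dict String String) s => d.insert s.1 s.2) PySem.Dict.empty).items.foldl
      (fun (r : PySem.Dict String String) kv =>
        let t := PySem.Str.strip kv.2
        if t ≠ "" then r.insert kv.1 t else r)
      PySem.Dict.empty).items := by
  obtain ⟨i', n', b', hB, hA⟩ := pv_loop lines [] "overview" []
  simp only [List.nil_append] at hB hA
  rw [hA]
  have hS : pvSegLFrom "overview" [] lines = i' ++ [(n', b')] := by
    have := pv_segfold_eq lines [] "overview" []
    simp only [List.nil_append] at this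
    rw [← this, ← hB]
  have hBdict : (pvSegments "overview" lines).foldl
      (fun (d : PySem.Dict String String) s => d.insert s.1 s.2) PySem.Dict.empty
      = pvSegsDict (fun b => PySem.Str.join "\n" b) (i' ++ [(n', b')]) := by
    rw [pv_segments_map lines "overview", hS, pvSegsDict, List.foldl_map]
  rw [hBdict]
  exact pv_final (i' ++ [(n', b')])

-- ===== VERDICT (by name: the statement is the Claim_ definition above) =====
theorem clean_content_spec : Claim_equal_clean_content := by
  intro content _
  show clean_content content = clean_content_alt content
  exact pv_main ((PySem.Str.split? content "\n").getD [])
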